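-- pv_equiv track=rewrite | github.com/UdhaikumarMohan/Strings-and-Pattern | freq of char/most_repeated.py | rep_word
-- ===== SOURCE A (Python) =====
-- def rep_word(String):
--
--     freq = {}
--
--     Sentence = String.split()
--
--     for a in Sentence:
--
--         if a in freq:
--
--             freq[a]+=1
--
--         else:
--
--             freq[a]=1
--
--     max=0
--     word=0
--     li=[]
--
--     for a in freq:
--
--         if freq[a]>max:
--
--             max = freq[a]
--             word=a
--
--     for a in freq:
--
--         if freq[a]==max:
--
--             li.append(a)
--
--     return li
-- ===== SOURCE B (Python) =====
-- def rep_word(String):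
--     freq = {}
--     for w in String.split():
--         freq[w] = freq.get(w, 0) + 1
--     if not freq:
--         return []
--     groups = {}
--     for w, c in freq.items():
--         groups.setdefault(c, []).append(w)
--     return groups[max(groups)]
-- ===== Notes on version B (the rewrite author's own statement) =====
-- stated objective: alternative
-- what changed: Replaces A's scan-for-max over the frequency dict followed by a second scan-for-equal with an inverted frequency->words table: words are bucketed by count and the bucket of the maximal count is returned directly.
import Mathlib
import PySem

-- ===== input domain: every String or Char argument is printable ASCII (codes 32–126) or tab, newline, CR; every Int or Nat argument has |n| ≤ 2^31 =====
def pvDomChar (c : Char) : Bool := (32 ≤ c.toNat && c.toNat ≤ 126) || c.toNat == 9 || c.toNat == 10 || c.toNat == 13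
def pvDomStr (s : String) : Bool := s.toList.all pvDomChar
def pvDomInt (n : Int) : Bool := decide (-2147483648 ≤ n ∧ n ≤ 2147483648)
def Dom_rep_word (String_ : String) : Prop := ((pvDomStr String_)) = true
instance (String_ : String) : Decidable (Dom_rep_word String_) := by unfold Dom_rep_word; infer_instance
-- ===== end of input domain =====

-- B replaces A's scan-for-max + scan-for-equal over the frequency dict by an inverted
-- count→words table whose maximal-count bucket is returned directly (alternative decomposition, same cost).


-- ===== PORT A =====
-- literal transliteration of A; Python's unused 'word' accumulator (int 0, later a word) never
-- affects the return value and is untypeable here, so it is omitted; 'for a in freq' reads keys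
-- in insertion order and freq[a] is getD (the key is always present).
def rep_word (String_ : String) : List String :=
  let Sentence := PySem.Str.split₀ String_
  let freq := Sentence.foldl
    (fun freq a => if freq.contains a then freq.modify a 0 (· + 1) else freq.insert a 1)
    (PySem.Dict.empty : PySem.Dict String Int)
  let max_ := freq.keys.foldl
    (fun max_ a => if freq.getD a 0 > max_ then freq.getD a 0 else max_) (0 : Int)
  freq.keys.foldl (fun li a => if freq.getD a 0 == max_ then li ++ [a] else li) []

-- ===== PORT B =====
-- literal transliteration of Source B; groups[max(groups)] is getD at the max? key, which is
-- always a present key (max? returns a member of keys); the 'none' arm is unreachable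
-- because the empty dict is returned from by the guard above it.
def rep_word_alt (String_ : String) : List String :=
  let freq := (PySem.Str.split₀ String_).foldl
    (fun freq w => freq.insert w (freq.getD w 0 + 1))
    (PySem.Dict.empty : PySem.Dict String Int)
  if freq.size = 0 then []
  else
    let groups := freq.items.foldl
      (fun groups p => groups.modify p.2 [] (· ++ [p.1]))
      (PySem.Dict.empty : PySem.Dict Int (List String))
    match PySem.List.max? groups.keys (fun c => c) with
    | some m => groups.getD m []
    | none => []

-- ===== PRECONDITION & SPEC =====
def Spec_rep_word (String_ : String) (out : List String) : Prop := out = rep_word_alt String_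
instance (String_ : String) (out : List String) : Decidable (Spec_rep_word String_ out) := by unfold Spec_rep_word; infer_instance

-- ===== CLAIM (what is proved, stated in full; the proofs are below) =====
def Claim_equal_rep_word : Prop := ∀ (String_ : String), Dom_rep_word String_ → Spec_rep_word String_ (rep_word String_)

-- ===== LEMMAS AND PROOFS =====

-- A's counting loop builds Counter(Sentence)
lemma freqA_eq_counter (ws : List String) :
    ws.foldl (fun freq a => if freq.contains a then freq.modify a 0 (· + 1) else freq.insert a 1)
      (PySem.Dict.empty : PySem.Dict String Int) = PySem.Dict.counter ws := by
  rw [← PySem.Dict.foldl_insert_getD_add_one_eq_counter]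
  apply PySem.List.foldl_congr_mem
  intro d a _
  by_cases h : d.contains a = true
  · simp [h, PySem.Dict.modify]
  · rw [if_neg h, PySem.Dict.getD_of_not_contains d 0 (by simpa using h)]
    norm_num

-- A's running-max loop is a foldl max over the counts
lemma runmax_eq (K : List String) (c : String → Int) :
    K.foldl (fun m a => if c a > m then c a else m) 0 = (K.map c).foldl max 0 := by
  rw [List.foldl_map]
  apply PySem.List.foldl_congr_mem
  intro m a _
  rcases lt_or_ge m (c a) with h | h
  · simp [h, max_eq_right h.le]
  · simp [not_lt.mpr h, max_eq_left h]

theorem rep_word_spec_aux (s : String) : rep_word s = rep_word_alt s := by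
  unfold rep_word rep_word_alt
  simp only [freqA_eq_counter, PySem.Dict.foldl_insert_getD_add_one_eq_counter]
  set ws := PySem.Str.split₀ s with hws
  by_cases hwsnil : ws = []
  · -- no words
    simp [hwsnil, PySem.Dict.counter, PySem.Dict.keys, PySem.Dict.size, PySem.Dict.empty]
  · -- at least one word
    obtain ⟨k0, t, hws0⟩ := List.exists_cons_of_ne_nil hwsnil
    have hk0K : k0 ∈ PySem.Set.ofList ws := (PySem.Set.mem_ofList ws k0).mpr (by rw [hws0]; simp)
    have hKne : (PySem.Set.ofList ws : List String) ≠ [] := by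
      intro h; rw [h] at hk0K; simp at hk0K
    -- B's guard is not taken
    have hsize : (PySem.Dict.counter ws).size ≠ 0 := by
      have : (PySem.Dict.counter ws).items ≠ [] := by
        rw [PySem.Dict.items_counter]; simpa using hKne
      simpa [PySem.Dict.size, PySem.Dict.keys, List.length_eq_zero_iff] using
        (by simpa [PySem.Dict.items] using this : (PySem.Dict.counter ws).items ≠ [])
    rw [if_neg hsize]
    set K : List String := PySem.Set.ofList ws with hKdef
    set c : String → Int := fun k => ((ws.count k : Nat) : Int) with hc
    -- rewrite getD over counter to counts
    have hgetD : ∀ a, (PySem.Dict.counter ws).getD a 0 = c a := fun a => PySem.Dict.getD_counter ws a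
    have hkeys : (PySem.Dict.counter ws).keys = K := PySem.Dict.keys_counter ws
    have hitems : (PySem.Dict.counter ws).items = K.map (fun k => (k, c k)) :=
      PySem.Dict.items_counter ws
    -- A's max value
    set m : Int := K.foldl (fun m a => if c a > m then c a else m) 0 with hm
    have hmA : (PySem.Dict.counter ws).keys.foldl
        (fun m a => if (PySem.Dict.counter ws).getD a 0 > m then (PySem.Dict.counter ws).getD a 0 else m) 0 = m := by
      rw [hkeys]
      apply PySem.List.foldl_congr_mem
      intro acc a _
      rw [hgetD]
    have hmfold : m = (K.map c).foldl max 0 := runmax_eq K c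
    -- counts are positive, so m ∈ K.map c
    have hpos : ∀ x ∈ K.map c, 1 ≤ x := by
      intro x hx
      obtain ⟨k, hk, rfl⟩ := List.mem_map.mp hx
      have : k ∈ ws := (PySem.Set.mem_ofList ws k).mp hk
      have := List.count_pos_iff.mpr this
      simp only [hc]; omega
    have hm1 : 1 ≤ m := by
      have hk0 : c k0 ∈ K.map c := List.mem_map_of_mem hk0K
      have := (PySem.List.le_foldl_max (K.map c) 0).2 _ hk0
      have := hpos _ hk0; omega
    have hmmem : m ∈ K.map c := by
      rcases PySem.List.foldl_max_mem (K.map c) 0 with h | h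
      · rw [hmfold] at hm1; omega
      · rw [hmfold]; exact h
    have hmub : ∀ y ∈ K.map c, y ≤ m := by
      rw [hmfold]; exact (PySem.List.le_foldl_max (K.map c) 0).2
    -- B's groups: rewrite the fold over items as the standard modify-fold over swapped pairs
    have hswap : (PySem.Dict.counter ws).items.foldl
        (fun groups p => groups.modify p.2 [] (· ++ [p.1]))
        (PySem.Dict.empty : PySem.Dict Int (List String))
        = (K.map (fun k => (c k, k))).foldl
            (fun groups p => groups.modify p.1 [] (· ++ [p.2]))
            (PySem.Dict.empty : PySem.Dict Int (List String)) := by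
      rw [hitems, List.foldl_map, List.foldl_map]
    rw [hswap]
    set groups : PySem.Dict Int (List String) :=
      (K.map (fun k => (c k, k))).foldl
        (fun groups p => groups.modify p.1 [] (· ++ [p.2])) PySem.Dict.empty with hg
    -- keys of groups are the distinct counts
    have hgkeys : groups.keys = PySem.Set.ofList (K.map c) := by
      rw [hg]
      have := PySem.Dict.keys_foldl_modify_key (K.map (fun k => (c k, k))) (fun p => p.1)
        ([] : List String) (fun _ p v => v ++ [p.2]) (PySem.Dict.empty : PySem.Dict Int (List String))
      simpa [PySem.Dict.keys, PySem.Dict.empty, PySem.Set.update, PySem.Set.ofList, List.map_map,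
        Function.comp] using this
    -- groups' buckets are the filtered key list
    have hbucket : ∀ v : Int, groups.getD v [] = K.filter (fun k => c k == v) := by
      intro v
      rw [hg]
      have := PySem.Dict.getD_foldl_modify_append (K.map (fun k => (c k, k)))
        (PySem.Dict.empty : PySem.Dict Int (List String)) v
      simpa [List.filter_map, List.map_map, Function.comp_def, PySem.Dict.getD_empty] using this
    -- the max over groups' keys is m
    have hKmapne : K.map c ≠ [] := by simp only [ne_eq, List.map_eq_nil_iff]; exact hKne
    obtain ⟨M, hM⟩ : ∃ M, PySem.List.max? groups.keys (fun c => c) = some M := by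
      cases hmx : PySem.List.max? groups.keys (fun c => c) with
      | none =>
        exfalso
        have hnil : groups.keys = [] := (PySem.List.max?_eq_none_iff _ _).mp hmx
        rw [hgkeys] at hnil
        have hmemM : c k0 ∈ PySem.Set.ofList (K.map c) :=
          (PySem.Set.mem_ofList _ _).mpr (List.mem_map_of_mem hk0K)
        rw [hnil] at hmemM
        simp at hmemM
      | some M => exact ⟨M, rfl⟩
    have hMmem : M ∈ K.map c := by
      have := PySem.List.max?_mem hM
      rw [hgkeys] at this
      exact (PySem.Set.mem_ofList _ _).mp this
    have hMub : ∀ y ∈ K.map c, y ≤ M := by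
      intro y hy
      have : y ∈ groups.keys := by rw [hgkeys]; exact (PySem.Set.mem_ofList _ _).mpr hy
      exact PySem.List.max?_isMax hM y this
    have hMm : M = m := le_antisymm (hmub _ hMmem) (hMub _ hmmem)
    have hmatch : (match some M with | some v => groups.getD v [] | none => ([] : List String))
        = groups.getD M [] := rfl
    rw [hM, hmA, hmatch, hbucket, hMm, hkeys]
    -- A's append loop is the filter
    have hfin : List.foldl (fun li a => if ((PySem.Dict.counter ws).getD a 0 == m) = true then li ++ [a] else li) [] K
        = List.foldl (fun li a => if (c a == m) = true then li ++ [a] else li) [] K := by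
      apply PySem.List.foldl_congr_mem
      intro acc a _
      rw [hgetD]
    rw [hfin]
    exact (PySem.List.foldl_append_if_eq_filter (fun a => c a == m) K []).trans (by simp)

-- ===== VERDICT (by name: the statement is the Claim_ definition above) =====
theorem rep_word_spec : Claim_equal_rep_word := by
  intro s _
  exact rep_word_spec_aux s
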